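-- pv_equiv track=rewrite | github.com/AndrewDul/smart-desk-ai-assistant | modules/features/memory/service.py | _strip_leading_fillers
-- ===== SOURCE A (Python) =====
-- def _strip_leading_fillers(text: str) -> str:
--     fillers = [
--         "my ",
--         "moje ",
--         "moj ",
--         "moja ",
--         "numer ",
--         "number ",
--         "the ",
--         "a ",
--         "an ",
--     ]
--
--     result = text
--     changed = True
--
--     while changed:
--         changed = False
--         for filler in fillers:
--             if result.startswith(filler):
--                 result = result[len(filler) :].strip()
--                 changed = True
--
--     return result
-- ===== SOURCE B (Python) =====
-- _FILLER_WORDS = {"my", "moje", "moj", "moja", "numer", "number", "the", "a", "an"}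
--
--
-- def _strip_leading_fillers(text: str) -> str:
--     # Look up the first space-terminated word in a set instead of scanning a
--     # filler list; repeat until the leading word is not a filler.
--     result = text
--     while True:
--         i = result.find(" ")
--         if i < 0 or result[:i] not in _FILLER_WORDS:
--             return result
--         result = result[i + 1:].strip()
-- ===== Notes on version B (the rewrite author's own statement) =====
-- stated objective: idiomatic
-- what changed: Instead of repeated passes that test result.startswith against each of the 9 filler strings with a changed flag, B finds the first space, looks the leading word up in a set, and strips one filler per iteration; correctness rests on the fillers being prefix-free.
import Mathlib
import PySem

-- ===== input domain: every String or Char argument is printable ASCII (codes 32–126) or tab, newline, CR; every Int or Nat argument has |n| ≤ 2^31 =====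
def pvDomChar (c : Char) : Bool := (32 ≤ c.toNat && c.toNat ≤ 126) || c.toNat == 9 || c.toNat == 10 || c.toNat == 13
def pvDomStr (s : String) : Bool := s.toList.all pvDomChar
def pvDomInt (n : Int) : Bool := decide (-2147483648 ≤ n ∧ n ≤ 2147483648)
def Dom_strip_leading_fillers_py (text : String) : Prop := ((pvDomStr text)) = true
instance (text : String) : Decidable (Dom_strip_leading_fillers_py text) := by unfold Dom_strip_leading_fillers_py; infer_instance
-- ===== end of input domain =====

-- B replaces A's repeated passes over the filler list by a set lookup of the first
-- space-terminated word (idiomatic; same results, no speed claim).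

-- ===== PORT A =====
def pvFillers : List (List Char) :=
  ["my ".toList, "moje ".toList, "moj ".toList, "moja ".toList, "numer ".toList,
   "number ".toList, "the ".toList, "a ".toList, "an ".toList]

-- the inner 'for filler in fillers' pass over state (result, changed)
def pvPassA : List (List Char) → List Char → Bool → List Char × Bool
  | [], r, c => (r, c)
  | f :: fs, r, c =>
      if PySem.Chars.startswith r f then
        -- result[len(filler):].strip(); the slice start is 0 ≤ len(filler), so it is List.drop
        pvPassA fs (PySem.Chars.strip (r.drop f.length)) true
      else pvPassA fs r c

-- the 'while changed' loop; fuel text.length+1 always suffices (each changed pass shortens result by ≥ 2)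
def pvLoopA : Nat → List Char → List Char
  | 0, r => r
  | n+1, r =>
      let rc := pvPassA pvFillers r false
      if rc.2 then pvLoopA n rc.1 else rc.1

def strip_leading_fillers_py (text : String) : String :=
  String.ofList (pvLoopA (text.toList.length + 1) text.toList)

-- ===== PORT B =====
def pvWordsB : List (List Char) :=
  ["my".toList, "moje".toList, "moj".toList, "moja".toList, "numer".toList,
   "number".toList, "the".toList, "a".toList, "an".toList]

-- one iteration of B's 'while True' body: none = the early 'return result'
def pvStepB (r : List Char) : Option (List Char) :=
  let i := PySem.Chars.find r [' ']                       -- result.find(" ")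
  if i < 0 then none
  else if pvWordsB.contains (r.take i.toNat) then         -- result[:i] in _FILLER_WORDS (0 ≤ i ≤ len, so the slice is take)
    some (PySem.Chars.strip (r.drop (i.toNat + 1)))       -- result[i+1:].strip()
  else none

def pvLoopB : Nat → List Char → List Char
  | 0, r => r
  | n+1, r =>
      match pvStepB r with
      | none => r
      | some r' => pvLoopB n r'

def strip_leading_fillers_py_alt (text : String) : String :=
  String.ofList (pvLoopB (text.toList.length + 1) text.toList)

-- ===== PRECONDITION & SPEC =====
def Spec_strip_leading_fillers_py (text : String) (out : String) : Prop := out = strip_leading_fillers_py_alt text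
instance (text : String) (out : String) : Decidable (Spec_strip_leading_fillers_py text out) := by unfold Spec_strip_leading_fillers_py; infer_instance

-- ===== CLAIM (what is proved, stated in full; the proofs are below) =====
def Claim_equal_strip_leading_fillers_py : Prop := ∀ (text : String), Dom_strip_leading_fillers_py text → Spec_strip_leading_fillers_py text (strip_leading_fillers_py text)

-- ===== LEMMAS AND PROOFS =====

-- canonical single step: apply the (unique) matching filler, as A's scan finds it
def pvStep (r : List Char) : Option (List Char) :=
  match pvFillers.find? (fun f => PySem.Chars.startswith r f) with
  | none => none
  | some f => some (PySem.Chars.strip (r.drop f.length))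

lemma pvFillers_eq : pvFillers = pvWordsB.map (fun w => w ++ [' ']) := by decide

lemma pvPairwise : pvFillers.Pairwise (fun a b => ¬ a <+: b ∧ ¬ b <+: a) := by decide

lemma pvWords_no_space : ∀ w ∈ pvWordsB, ' ' ∉ w := by decide

lemma pvFillers_len : ∀ f ∈ pvFillers, 2 ≤ f.length := by decide

lemma pvStripLen (cs : List Char) : (PySem.Chars.strip cs).length ≤ cs.length := by
  simp only [PySem.Chars.strip, PySem.Chars.rstrip, PySem.Chars.lstrip]
  have h1 := (List.dropWhile_sublist (l := cs) (p := PySem.Chars.isspace)).length_le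
  have h2 := (List.dropWhile_sublist
      (l := (List.dropWhile PySem.Chars.isspace cs).reverse) (p := PySem.Chars.isspace)).length_le
  simp only [List.length_reverse] at *
  omega

lemma pvFindUniq : ∀ (l : List (List Char)) (r f : List Char),
    l.Pairwise (fun a b => ¬ a <+: b ∧ ¬ b <+: a) → f ∈ l →
    PySem.Chars.startswith r f = true →
    l.find? (fun g => PySem.Chars.startswith r g) = some f := by
  intro l
  induction l with
  | nil => intro r f _ hf; simp at hf
  | cons g gs ih =>
    intro r f hpw hf hsw
    rcases List.pairwise_cons.1 hpw with ⟨hg, hgs⟩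
    rcases List.mem_cons.1 hf with hf | hf
    · subst hf; simp [List.find?, hsw]
    · have hgf := hg f hf
      have hgne : PySem.Chars.startswith r g = false := by
        by_contra h
        have hswg : PySem.Chars.startswith r g = true := by
          cases hb : PySem.Chars.startswith r g <;> simp [hb] at h ⊢
        have h1 := (PySem.Chars.startswith_iff r g).1 hswg
        have h2 := (PySem.Chars.startswith_iff r f).1 hsw
        rcases List.prefix_or_prefix_of_prefix h1 h2 with hc | hc
        · exact hgf.1 hc
        · exact hgf.2 hc
      simp [List.find?, hgne]
      exact ih r f hgs hf hsw

lemma pvStep_some {r r' : List Char} (h : pvStep r = some r') :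
    ∃ f ∈ pvFillers, PySem.Chars.startswith r f = true ∧
      r' = PySem.Chars.strip (r.drop f.length) := by
  unfold pvStep at h
  cases hf : pvFillers.find? (fun f => PySem.Chars.startswith r f) with
  | none => rw [hf] at h; exact absurd h (by simp)
  | some f =>
    rw [hf] at h
    refine ⟨f, List.mem_of_find?_eq_some hf, List.find?_some hf, ?_⟩
    simpa using h.symm

lemma pvStep_len {r r' : List Char} (h : pvStep r = some r') : r'.length + 2 ≤ r.length := by
  obtain ⟨f, hmem, hsw, rfl⟩ := pvStep_some h
  have hpre := (PySem.Chars.startswith_iff r f).1 hsw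
  have hle := hpre.length_le
  have h2 := pvFillers_len f hmem
  have h3 := pvStripLen (r.drop f.length)
  simp only [List.length_drop] at h3
  omega

-- B's word-set step computes exactly the canonical filler step
lemma pvStepB_eq (r : List Char) : pvStepB r = pvStep r := by
  cases hf : pvFillers.find? (fun f => PySem.Chars.startswith r f) with
  | none =>
    have hno : ∀ f ∈ pvFillers, ¬ PySem.Chars.startswith r f = true := by
      intro f hfm
      have := List.find?_eq_none.1 hf f hfm
      simpa using this
    unfold pvStepB pvStep
    rw [hf]
    by_cases hi : PySem.Chars.find r [' '] < 0
    · simp [hi]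
    · have h0 : 0 ≤ PySem.Chars.find r [' '] := by omega
      obtain ⟨hpre, -⟩ := PySem.Chars.find_spec h0
      obtain ⟨t, ht⟩ := hpre
      have hcon : pvWordsB.contains (r.take (PySem.Chars.find r [' ']).toNat) = false := by
        by_contra hc
        have hcmem : r.take (PySem.Chars.find r [' ']).toNat ∈ pvWordsB := by
          have hb : pvWordsB.contains (r.take (PySem.Chars.find r [' ']).toNat) = true := by
            cases hb : pvWordsB.contains (r.take (PySem.Chars.find r [' ']).toNat)
            · exact absurd hb hc
            · rfl
          exact List.mem_of_elem_eq_true hb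
        have hfmem : (r.take (PySem.Chars.find r [' ']).toNat ++ [' ']) ∈ pvFillers := by
          rw [pvFillers_eq]; exact List.mem_map_of_mem hcmem
        apply hno _ hfmem
        rw [PySem.Chars.startswith_iff]
        refine ⟨t, ?_⟩
        calc (r.take (PySem.Chars.find r [' ']).toNat ++ [' ']) ++ t
            = r.take (PySem.Chars.find r [' ']).toNat ++ ([' '] ++ t) := by simp
          _ = r.take (PySem.Chars.find r [' ']).toNat
                ++ r.drop (PySem.Chars.find r [' ']).toNat := by rw [ht]
          _ = r := List.take_append_drop _ r
      rw [if_neg hi, hcon]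
      simp
  | some f =>
    have hmem := List.mem_of_find?_eq_some hf
    have hsw : PySem.Chars.startswith r f = true := List.find?_some hf
    obtain ⟨w, hw, rfl⟩ : ∃ w ∈ pvWordsB, f = w ++ [' '] := by
      rw [pvFillers_eq] at hmem
      obtain ⟨w, hw, hwe⟩ := List.mem_map.1 hmem
      exact ⟨w, hw, hwe.symm⟩
    obtain ⟨t, ht⟩ := (PySem.Chars.startswith_iff r (w ++ [' '])).1 hsw
    have hr : r = w ++ ' ' :: t := by rw [← ht]; simp
    have hsp : [' '] <+: r.drop w.length := by
      rw [hr, List.drop_left]; exact ⟨t, rfl⟩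
    have h0 : 0 ≤ PySem.Chars.find r [' '] := by
      rw [PySem.Chars.find_nonneg_iff]
      exact ⟨w, t, by simp [hr]⟩
    obtain ⟨hjp, hmin⟩ := PySem.Chars.find_spec h0
    set j := (PySem.Chars.find r [' ']).toNat with hj
    have hjle : j ≤ w.length := by
      by_contra hlt
      exact hmin w.length (by omega) hsp
    have hjeq : j = w.length := by
      rcases Nat.lt_or_ge j w.length with hlt | hge
      · exfalso
        obtain ⟨t', ht'⟩ := hjp
        have hget : r[j]? = some ' ' := by
          have h00 : (r.drop j)[0]? = r[j]? := by
            simp [List.getElem?_drop]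
          rw [← h00, ← ht']; simp
        have hgw : r[j]? = w[j]? := by
          rw [hr, List.getElem?_append_left (by omega)]
        have : ' ' ∈ w := by
          apply List.mem_of_getElem? (i := j)
          rw [← hgw, hget]
        exact pvWords_no_space w hw this
      · omega
    have hfind : PySem.Chars.find r [' '] = (w.length : Int) := by
      rw [← hjeq, hj, Int.toNat_of_nonneg h0]
    unfold pvStepB pvStep
    rw [hf, hfind]
    have hnn : ¬ ((w.length : Int) < 0) := by omega
    have htake : r.take (w.length : Int).toNat = w := by
      rw [Int.toNat_natCast, hr]
      exact List.take_left
    have hdrop : r.drop ((w.length : Int).toNat + 1) = t := by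
      rw [Int.toNat_natCast, hr]
      have : w ++ ' ' :: t = (w ++ [' ']) ++ t := by simp
      rw [this]
      have hl : w.length + 1 = (w ++ [' ']).length := by simp
      rw [hl, List.drop_left]
    have hcon : pvWordsB.contains w = true := List.elem_eq_true_of_mem hw
    simp only [if_neg hnn, htake, hcon, hdrop]
    have hdr : r.drop (w ++ [' ']).length = t := by
      rw [hr]
      have he : w ++ ' ' :: t = (w ++ [' ']) ++ t := by simp
      rw [he, List.drop_left]
    rw [hdr]
    simp

lemma pvLoopB_succ (n : Nat) (r : List Char) :
    pvLoopB (n+1) r = match pvStep r with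
      | none => r
      | some r' => pvLoopB n r' := by
  simp only [pvLoopB, pvStepB_eq]

lemma pvLoopB_fuel : ∀ (k n m : Nat) (r : List Char), r.length ≤ k →
    r.length < n → r.length < m → pvLoopB n r = pvLoopB m r := by
  intro k
  induction k with
  | zero =>
    intro n m r hk hn hm
    obtain ⟨n', rfl⟩ : ∃ n', n = n' + 1 := ⟨n - 1, by omega⟩
    obtain ⟨m', rfl⟩ : ∃ m', m = m' + 1 := ⟨m - 1, by omega⟩
    rw [pvLoopB_succ, pvLoopB_succ]
    cases hs : pvStep r with
    | none => rfl
    | some r' => exact absurd (pvStep_len hs) (by omega)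
  | succ k ih =>
    intro n m r hk hn hm
    obtain ⟨n', rfl⟩ : ∃ n', n = n' + 1 := ⟨n - 1, by omega⟩
    obtain ⟨m', rfl⟩ : ∃ m', m = m' + 1 := ⟨m - 1, by omega⟩
    rw [pvLoopB_succ, pvLoopB_succ]
    cases hs : pvStep r with
    | none => rfl
    | some r' =>
      have hl := pvStep_len hs
      exact ih n' m' r' (by omega) (by omega) (by omega)

lemma pvPass_fst : ∀ (fs : List (List Char)) (r : List Char) (c : Bool),
    (pvPassA fs r c).1 = (pvPassA fs r false).1 := by
  intro fs
  induction fs with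
  | nil => intro r c; rfl
  | cons f fs ih =>
    intro r c
    simp only [pvPassA]
    split
    · rfl
    · exact ih r c

lemma pvPass_snd_true : ∀ (fs : List (List Char)) (r : List Char),
    (pvPassA fs r true).2 = true := by
  intro fs
  induction fs with
  | nil => intro r; rfl
  | cons f fs ih =>
    intro r
    simp only [pvPassA]
    split
    · exact ih _
    · exact ih _

lemma pvPass_false : ∀ (fs : List (List Char)) (r : List Char),
    (pvPassA fs r false).2 = false →
    (pvPassA fs r false).1 = r ∧ ∀ f ∈ fs, ¬ PySem.Chars.startswith r f = true := by
  intro fs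
  induction fs with
  | nil => intro r _; exact ⟨rfl, by simp⟩
  | cons f fs ih =>
    intro r h
    simp only [pvPassA] at h ⊢
    by_cases hsw : PySem.Chars.startswith r f = true
    · rw [if_pos hsw] at h
      rw [pvPass_snd_true] at h
      exact absurd h (by simp)
    · rw [if_neg hsw] at h ⊢
      obtain ⟨h1, h2⟩ := ih r h
      refine ⟨h1, ?_⟩
      intro g hg
      rcases List.mem_cons.1 hg with hg | hg
      · subst hg; exact hsw
      · exact h2 g hg

lemma pvPass_len : ∀ (fs : List (List Char)) (r : List Char),
    (∀ f ∈ fs, f ∈ pvFillers) →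
    (pvPassA fs r false).1.length ≤ r.length ∧
      ((pvPassA fs r false).2 = true → (pvPassA fs r false).1.length + 2 ≤ r.length) := by
  intro fs
  induction fs with
  | nil => intro r _; exact ⟨le_refl _, by simp [pvPassA]⟩
  | cons f fs ih =>
    intro r hmem
    simp only [pvPassA]
    by_cases hsw : PySem.Chars.startswith r f = true
    · rw [if_pos hsw]
      have hpre := (PySem.Chars.startswith_iff r f).1 hsw
      have hfl := pvFillers_len f (hmem f (by simp))
      have hlen := hpre.length_le
      set r₁ := PySem.Chars.strip (r.drop f.length) with hr₁
      have hsl := pvStripLen (r.drop f.length)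
      simp only [List.length_drop] at hsl
      rw [← hr₁] at hsl
      have h1 : r₁.length + 2 ≤ r.length := by omega
      rw [pvPass_fst fs r₁ true]
      obtain ⟨ha, -⟩ := ih r₁ (fun g hg => hmem g (by simp [hg]))
      exact ⟨by omega, fun _ => by omega⟩
    · rw [if_neg hsw]
      exact ih r (fun g hg => hmem g (by simp [hg]))

lemma pvPass_loopB : ∀ (fs : List (List Char)) (r : List Char) (n : Nat),
    (∀ f ∈ fs, f ∈ pvFillers) → r.length < n →
    pvLoopB n (pvPassA fs r false).1 = pvLoopB n r := by
  intro fs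
  induction fs with
  | nil => intro r n _ _; rfl
  | cons f fs ih =>
    intro r n hmem hn
    simp only [pvPassA]
    by_cases hsw : PySem.Chars.startswith r f = true
    · rw [if_pos hsw]
      have hstep : pvStep r = some (PySem.Chars.strip (r.drop f.length)) := by
        unfold pvStep
        rw [pvFindUniq pvFillers r f pvPairwise (hmem f (by simp)) hsw]
      set r₁ := PySem.Chars.strip (r.drop f.length) with hr₁
      have hl := pvStep_len hstep
      obtain ⟨n', rfl⟩ : ∃ n', n = n' + 1 := ⟨n - 1, by omega⟩
      rw [pvPass_fst fs r₁ true]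
      rw [ih r₁ (n'+1) (fun g hg => hmem g (by simp [hg])) (by omega)]
      rw [pvLoopB_succ n' r, hstep]
      exact pvLoopB_fuel r₁.length (n'+1) n' r₁ (le_refl _) (by omega) (by omega)
    · rw [if_neg hsw]
      exact ih r n (fun g hg => hmem g (by simp [hg])) hn

lemma pvLoop_eq : ∀ (n : Nat) (r : List Char), r.length < n → pvLoopA n r = pvLoopB n r := by
  intro n
  induction n with
  | zero => intro r h; omega
  | succ n ih =>
    intro r hn
    simp only [pvLoopA]
    cases hc : (pvPassA pvFillers r false).2
    · obtain ⟨h1, h2⟩ := pvPass_false pvFillers r hc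
      have hstep : pvStep r = none := by
        unfold pvStep
        rw [List.find?_eq_none.2 (fun f hf => by simpa using h2 f hf)]
      rw [pvLoopB_succ, hstep]
      simp [h1]
    · set r' := (pvPassA pvFillers r false).1 with hr'
      have hlen : r'.length + 2 ≤ r.length :=
        (pvPass_len pvFillers r (fun f hf => hf)).2 hc
      rw [ih r' (by omega)]
      rw [pvLoopB_fuel r'.length n (n+1) r' (le_refl _) (by omega) (by omega)]
      exact pvPass_loopB pvFillers r (n+1) (fun f hf => hf) (by omega)

-- ===== VERDICT (by name: the statement is the Claim_ definition above) =====
theorem strip_leading_fillers_py_spec : Claim_equal_strip_leading_fillers_py := by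
  intro text _
  unfold Spec_strip_leading_fillers_py strip_leading_fillers_py strip_leading_fillers_py_alt
  rw [pvLoop_eq (text.toList.length + 1) text.toList (by omega)]
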